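-- pv_equiv track=rewrite | github.com/joaomonteirof/multitask_asv | utils/harvester_old.py | calculate_cumfreq
-- ===== SOURCE A (Python) =====
-- def calculate_cumfreq(target):
-- 	cumfreq = [0]
-- 	s = 1
-- 	for t in range(len(target) - 1):
-- 		if not target[t + 1] == target[t]:
-- 			cumfreq.append(s)
-- 		s = s + 1
--
-- 	cumfreq.append(s)
-- 	return cumfreq
-- ===== SOURCE B (Python) =====
-- from itertools import groupby, accumulate
--
--
-- def calculate_cumfreq(target):
--     lengths = [sum(1 for _ in g) for _, g in groupby(target)]
--     return [0] + list(accumulate(lengths))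
-- ===== Notes on version B (the rewrite author's own statement) =====
-- stated objective: idiomatic
-- what changed: Replaced the index-based boundary-detecting scan with the standard-library decomposition: itertools.groupby builds the run-length table and itertools.accumulate produces the cumulative sums.
-- intended difference: On the empty list A's unconditional final append makes it return the two-element list 0,1 (counting a nonexistent element), while B returns just the single 0, the correct cumulative-count list for an empty sequence. — e.g. on calculate_cumfreq([]): A returns [0, 1], B returns [0]
import Mathlib
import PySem

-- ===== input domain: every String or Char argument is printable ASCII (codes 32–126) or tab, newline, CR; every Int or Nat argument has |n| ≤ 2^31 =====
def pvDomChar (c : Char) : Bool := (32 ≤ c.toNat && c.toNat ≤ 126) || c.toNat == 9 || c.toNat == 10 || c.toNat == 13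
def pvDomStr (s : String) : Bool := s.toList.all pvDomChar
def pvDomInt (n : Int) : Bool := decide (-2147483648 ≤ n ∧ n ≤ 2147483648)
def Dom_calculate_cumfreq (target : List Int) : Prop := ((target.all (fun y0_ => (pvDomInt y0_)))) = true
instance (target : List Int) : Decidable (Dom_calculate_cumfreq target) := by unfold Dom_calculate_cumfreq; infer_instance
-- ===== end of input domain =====

-- B replaces A's index-based boundary scan with "run-length table, then cumulative sums" (idiomatic);
-- on the empty list the two differ (stated as D_ below).

-- ===== PORT A =====
-- literal transliteration of A: fold over range(len(target)-1) carrying (cumfreq, s)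
def calculate_cumfreq (target : List Int) : List Int :=
  let r := (PySem.List.pyRange 0 ((target.length : Int) - 1) 1).foldl
    (fun (acc : List Int × Int) t =>
      ((if ¬ (PySem.List.pyGetD target (t + 1) 0 == PySem.List.pyGetD target t 0)
        then acc.1 ++ [acc.2] else acc.1), acc.2 + 1))
    ([0], 1)
  r.1 ++ [r.2]

-- ===== PORT B =====
-- hand port of itertools.groupby group lengths: [sum(1 for _ in g) for _, g in groupby(target)]
-- (exact: groupby groups maximal runs of consecutive equal elements, in order)
def pvGroupGo (prev : Int) (k : Int) : List Int → List Int
  | [] => [k]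
  | y :: ys => if y == prev then pvGroupGo y (k + 1) ys else k :: pvGroupGo y 1 ys

def pvGroupLengths : List Int → List Int
  | [] => []
  | x :: xs => pvGroupGo x 1 xs

-- hand port of itertools.accumulate with running sum s (exact: no initial element emitted)
def pvAccumulate (s : Int) : List Int → List Int
  | [] => []
  | x :: xs => (s + x) :: pvAccumulate (s + x) xs

def calculate_cumfreq_alt (target : List Int) : List Int :=
  0 :: pvAccumulate 0 (pvGroupLengths target)

-- ===== PRECONDITION & SPEC =====
-- On the empty list A's unconditional final append makes it return the two-element list 0,1
-- (counting a nonexistent element), while B returns just the single 0, the correct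
-- cumulative-count list for an empty sequence.
def D_calculate_cumfreq (target : List Int) : Prop := target = []
instance (target : List Int) : Decidable (D_calculate_cumfreq target) := by unfold D_calculate_cumfreq; infer_instance

def Spec_calculate_cumfreq (target : List Int) (out : List Int) : Prop := ¬ D_calculate_cumfreq target → out = calculate_cumfreq_alt target
instance (target : List Int) (out : List Int) : Decidable (Spec_calculate_cumfreq target out) := by unfold Spec_calculate_cumfreq; infer_instance

def pvDiffWitness_calculate_cumfreq : List Int := ([])
def pvDiffWitnessOut_calculate_cumfreq : (List Int) × (List Int) := ([0, 1], [0])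

-- ===== CLAIM (what is proved, stated in full; the proofs are below) =====
def Claim_unchanged_calculate_cumfreq : Prop := ∀ (target : List Int), Dom_calculate_cumfreq target → Spec_calculate_cumfreq target (calculate_cumfreq target)
def Claim_changed_calculate_cumfreq : Prop := Dom_calculate_cumfreq (pvDiffWitness_calculate_cumfreq) ∧ D_calculate_cumfreq (pvDiffWitness_calculate_cumfreq) ∧ calculate_cumfreq (pvDiffWitness_calculate_cumfreq) = pvDiffWitnessOut_calculate_cumfreq.1 ∧ calculate_cumfreq_alt (pvDiffWitness_calculate_cumfreq) = pvDiffWitnessOut_calculate_cumfreq.2 ∧ pvDiffWitnessOut_calculate_cumfreq.1 ≠ pvDiffWitnessOut_calculate_cumfreq.2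
def Claim_exact_calculate_cumfreq : Prop := ∀ (target : List Int), Dom_calculate_cumfreq target → D_calculate_cumfreq target → calculate_cumfreq target ≠ calculate_cumfreq_alt target

-- ===== LEMMAS AND PROOFS =====

-- reference recursion: the tail of the result, given previous element and current position s
def pvCore (prev : Int) (s : Int) : List Int → List Int
  | [] => [s]
  | y :: ys => if ¬ (y == prev) then s :: pvCore y (s + 1) ys else pvCore y (s + 1) ys

-- B's side equals pvCore
theorem pvAcc_go (xs : List Int) : ∀ (prev k s : Int),
    pvAccumulate s (pvGroupGo prev k xs) = pvCore prev (s + k) xs := by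
  induction xs with
  | nil => intro prev k s; simp [pvGroupGo, pvAccumulate, pvCore]
  | cons y ys ih =>
    intro prev k s
    by_cases h : y = prev
    · rw [show pvGroupGo prev k (y :: ys) = pvGroupGo y (k + 1) ys by simp [pvGroupGo, h],
        ih, show s + (k + 1) = (s + k) + 1 by ring]
      simp [pvCore, h]
    · rw [show pvGroupGo prev k (y :: ys) = k :: pvGroupGo y 1 ys by simp [pvGroupGo, h]]
      rw [show pvAccumulate s (k :: pvGroupGo y 1 ys)
            = (s + k) :: pvAccumulate (s + k) (pvGroupGo y 1 ys) from rfl, ih]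
      simp [pvCore, h]

theorem alt_eq_core (x : Int) (xs : List Int) :
    calculate_cumfreq_alt (x :: xs) = 0 :: pvCore x 1 xs := by
  have := pvAcc_go xs x 1 0
  simp only [calculate_cumfreq_alt, pvGroupLengths, this, zero_add]

-- A's index pairs are the consecutive pairs
theorem pairs_eq (x : Int) (xs : List Int) :
    (PySem.List.pyRange 0 (((x :: xs).length : Int) - 1) 1).map
      (fun t => (PySem.List.pyGetD (x :: xs) (t + 1) 0, PySem.List.pyGetD (x :: xs) t 0))
      = xs.zip (x :: xs) := by
  apply List.ext_getElem
  · simp [PySem.List.length_pyRange_one, List.length_zip]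
  · intro k h1 h2
    have hk : k < xs.length := by
      simpa [PySem.List.length_pyRange_one] using h1
    simp only [List.getElem_map, PySem.List.getElem_pyRange_one, List.getElem_zip]
    have h1' : ((0 : Int) + (k : Int)) + 1 = ((k + 1 : Nat) : Int) := by push_cast; ring
    have h2' : ((0 : Int) + (k : Int)) = ((k : Nat) : Int) := by ring
    rw [h1', h2', PySem.List.pyGetD_natCast, PySem.List.pyGetD_natCast]
    have e1 : (x :: xs).getD (k + 1) 0 = xs[k] := by
      rw [List.getD_eq_getElem?_getD, List.getElem?_cons_succ, List.getElem?_eq_getElem hk,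
        Option.getD_some]
    have e2 : (x :: xs).getD k 0 = (x :: xs)[k]'(by simp; omega) := by
      rw [List.getD_eq_getElem?_getD,
        List.getElem?_eq_getElem (show k < (x :: xs).length by simp; omega), Option.getD_some]
    rw [e1, e2]

-- the pair fold equals appending pvCore
theorem fold_pairs (xs : List Int) : ∀ (x : Int) (cf : List Int) (s : Int),
    ((xs.zip (x :: xs)).foldl
        (fun (acc : List Int × Int) (p : Int × Int) =>
          ((if ¬ (p.1 == p.2) then acc.1 ++ [acc.2] else acc.1), acc.2 + 1)) (cf, s)).1
      ++ [((xs.zip (x :: xs)).foldl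
        (fun (acc : List Int × Int) (p : Int × Int) =>
          ((if ¬ (p.1 == p.2) then acc.1 ++ [acc.2] else acc.1), acc.2 + 1)) (cf, s)).2]
      = cf ++ pvCore x s xs := by
  induction xs with
  | nil => intro x cf s; simp [pvCore]
  | cons y ys ih =>
    intro x cf s
    by_cases h : y = x
    · simpa [pvCore, h, List.zip_cons_cons] using ih y cf (s + 1)
    · simpa [pvCore, h, List.zip_cons_cons] using ih y (cf ++ [s]) (s + 1)

theorem a_eq_core (x : Int) (xs : List Int) :
    calculate_cumfreq (x :: xs) = 0 :: pvCore x 1 xs := by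
  have hfold :
      (PySem.List.pyRange 0 (((x :: xs).length : Int) - 1) 1).foldl
        (fun (acc : List Int × Int) t =>
          ((if ¬ (PySem.List.pyGetD (x :: xs) (t + 1) 0 == PySem.List.pyGetD (x :: xs) t 0)
            then acc.1 ++ [acc.2] else acc.1), acc.2 + 1)) ([0], 1)
        = (xs.zip (x :: xs)).foldl
        (fun (acc : List Int × Int) (p : Int × Int) =>
          ((if ¬ (p.1 == p.2) then acc.1 ++ [acc.2] else acc.1), acc.2 + 1)) (([0] : List Int), (1 : Int)) := by
    rw [← pairs_eq x xs, List.foldl_map]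
  have hmain := fold_pairs xs x [0] 1
  simp only [calculate_cumfreq, hfold]
  simpa using hmain

-- ===== VERDICT (by name: the statement is the Claim_ definition above) =====
theorem calculate_cumfreq_spec : Claim_unchanged_calculate_cumfreq := by
  intro target _ hD
  cases target with
  | nil => exact absurd rfl hD
  | cons x xs => rw [a_eq_core, alt_eq_core]

theorem calculate_cumfreq_changed : Claim_changed_calculate_cumfreq := by
  unfold Claim_changed_calculate_cumfreq; decide

theorem calculate_cumfreq_tight : Claim_exact_calculate_cumfreq := by
  intro target _ hD
  subst hD
  decide
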